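-- pv_equiv track=rewrite | github.com/sssdcxy/ai_learning | Learning/AlgorithmByHand/KNN/KDTree.py | exhausted_search
-- ===== SOURCE A (Python) =====
-- def get_euclidean_distance(arr1, arr2):
--     return sum((x1 - x2) ** 2 for x1, x2 in zip(arr1, arr2))
--
-- def exhausted_search(X, Xi):
--     dist_best = float("inf")
--     row_best = None
--     for row in X:
--          dist = get_euclidean_distance(Xi, row)
--          if dist < dist_best:
--              dist_best = dist
--              row_best = row
--     return row_best
-- ===== SOURCE B (Python) =====
-- def get_euclidean_distance(arr1, arr2):
--     return sum((x1 - x2) ** 2 for x1, x2 in zip(arr1, arr2))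
--
-- def exhausted_search(X, Xi):
--     if not X:
--         return None
--     dists = [get_euclidean_distance(Xi, row) for row in X]
--     return X[dists.index(min(dists))]
-- ===== Notes on version B (the rewrite author's own statement) =====
-- stated objective: alternative
-- what changed: Replaces A's single loop that threads a (best-distance, best-row) pair through every iteration with a table-then-argmin decomposition: build the list of squared distances once, then take X[dists.index(min(dists))], which has the same first-minimum tie-break as A's strict '<'.
import Mathlib
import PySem

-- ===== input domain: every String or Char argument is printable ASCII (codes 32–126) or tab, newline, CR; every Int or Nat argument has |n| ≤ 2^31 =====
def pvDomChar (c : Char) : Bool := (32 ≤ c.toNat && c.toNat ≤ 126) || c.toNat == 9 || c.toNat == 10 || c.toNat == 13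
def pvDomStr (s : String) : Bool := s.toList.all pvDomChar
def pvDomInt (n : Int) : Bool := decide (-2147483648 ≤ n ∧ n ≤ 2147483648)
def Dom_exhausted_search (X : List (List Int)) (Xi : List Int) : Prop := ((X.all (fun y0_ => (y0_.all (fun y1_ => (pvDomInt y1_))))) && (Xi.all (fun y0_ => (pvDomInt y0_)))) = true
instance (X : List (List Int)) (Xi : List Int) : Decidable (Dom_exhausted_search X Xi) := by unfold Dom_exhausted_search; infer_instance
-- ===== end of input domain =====

-- B replaces A's best-so-far loop by a distance table followed by index-of-minimum (alternative decomposition, same cost).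

-- ===== PORT A =====
-- shared helper: sum((x1-x2)**2 for x1,x2 in zip(arr1,arr2))
def get_euclidean_distance (arr1 arr2 : List Int) : Int :=
  (List.zip arr1 arr2).foldl (fun s p => s + (p.1 - p.2) ^ 2) 0

-- A's loop: dist_best starts at float('inf') (modeled as `none`: any integer distance beats it), row_best at None
def exhausted_search (X : List (List Int)) (Xi : List Int) : Option (List Int) :=
  (X.foldl
    (fun (st : Option Int × Option (List Int)) row =>
      let dist := get_euclidean_distance Xi row
      match st.1 with
      | none => (some dist, some row)
      | some db => if dist < db then (some dist, some row) else st)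
    (none, none)).2

-- ===== PORT B =====
def exhausted_search_alt (X : List (List Int)) (Xi : List Int) : Option (List Int) :=
  if X = [] then none
  else
    let dists := X.map (fun row => get_euclidean_distance Xi row)
    match PySem.List.min? dists (fun x => x) with
    | none => none
    | some m =>
      match PySem.List.index? dists m with
      | none => none
      | some i => PySem.List.pyGet? X (i : Int)

-- ===== PRECONDITION & SPEC =====
def Spec_exhausted_search (X : List (List Int)) (Xi : List Int) (out : Option (List Int)) : Prop := out = exhausted_search_alt X Xi
instance (X : List (List Int)) (Xi : List Int) (out : Option (List Int)) : Decidable (Spec_exhausted_search X Xi out) := by unfold Spec_exhausted_search; infer_instance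

-- ===== CLAIM (what is proved, stated in full; the proofs are below) =====
def Claim_equal_exhausted_search : Prop := ∀ (X : List (List Int)) (Xi : List Int), Dom_exhausted_search X Xi → Spec_exhausted_search X Xi (exhausted_search X Xi)

-- ===== LEMMAS AND PROOFS =====

-- the value B computes for a non-empty list x :: xs, with min? unfolded to the running fold (min?_id_cons)
def bVal (Xi : List Int) (x : List Int) (xs : List (List Int)) : Option (List Int) :=
  let d := fun r => get_euclidean_distance Xi r
  let m := (xs.map d).foldl min (d x)
  match PySem.List.index? (d x :: xs.map d) m with
  | none => none
  | some i => PySem.List.pyGet? (x :: xs) (i : Int)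

theorem alt_cons_eq_bVal (Xi x : List Int) (xs : List (List Int)) :
    exhausted_search_alt (x :: xs) Xi = bVal Xi x xs := by
  simp only [exhausted_search_alt, bVal, List.map_cons, PySem.List.min?_id_cons,
    if_neg (List.cons_ne_nil x xs)]

theorem loopA_eq_bVal (Xi : List Int) (xs : List (List Int)) : ∀ (x : List Int),
    (xs.foldl
      (fun (st : Option Int × Option (List Int)) row =>
        let dist := get_euclidean_distance Xi row
        match st.1 with
        | none => (some dist, some row)
        | some db => if dist < db then (some dist, some row) else st)
      (some (get_euclidean_distance Xi x), some x)).2 = bVal Xi x xs := by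
  induction xs with
  | nil =>
    intro x
    simp [bVal]
  | cons y xs ih =>
    intro x
    by_cases h : get_euclidean_distance Xi y < get_euclidean_distance Xi x
    · -- the loop replaces the best with y; B's minimum also comes from (y :: xs)
      have hL : (List.foldl
          (fun (st : Option Int × Option (List Int)) row =>
            let dist := get_euclidean_distance Xi row
            match st.1 with
            | none => (some dist, some row)
            | some db => if dist < db then (some dist, some row) else st)
          (some (get_euclidean_distance Xi x), some x) (y :: xs)).2 = bVal Xi y xs := by
        simp only [List.foldl_cons]
        rw [if_pos h]
        exact ih y
      rw [hL]
      unfold bVal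
      have hmin : min (get_euclidean_distance Xi x) (get_euclidean_distance Xi y)
          = get_euclidean_distance Xi y := by omega
      have hm_le := (PySem.List.foldl_min_le
        (xs.map (fun r => get_euclidean_distance Xi r)) (get_euclidean_distance Xi y)).1
      have hne : get_euclidean_distance Xi x
          ≠ List.foldl min (get_euclidean_distance Xi y)
              (xs.map (fun r => get_euclidean_distance Xi r)) := by omega
      simp only [List.map_cons, List.foldl_cons, hmin]
      rw [PySem.List.index?_cons_of_ne _ hne]
      cases hidx : PySem.List.index?
          (get_euclidean_distance Xi y :: xs.map (fun r => get_euclidean_distance Xi r))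
          (List.foldl min (get_euclidean_distance Xi y)
            (xs.map (fun r => get_euclidean_distance Xi r))) with
      | none =>
        -- impossible: the minimum is a member of the list it is taken over
        have hmem : List.foldl min (get_euclidean_distance Xi y)
            (xs.map (fun r => get_euclidean_distance Xi r))
            ∈ get_euclidean_distance Xi y :: xs.map (fun r => get_euclidean_distance Xi r) := by
          rcases PySem.List.foldl_min_mem
              (xs.map (fun r => get_euclidean_distance Xi r)) (get_euclidean_distance Xi y)
              with h1 | h1
          · rw [h1]; exact List.mem_cons_self
          · exact List.mem_cons_of_mem _ h1
        have := (PySem.List.index?_isSome_iff _ _).2 hmem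
        rw [hidx] at this; simp at this
      | some j =>
        simp only [Option.map_some]
        rw [PySem.List.pyGet?_natCast, PySem.List.pyGet?_natCast]
        simp
    · -- the loop keeps x; B's minimum ignores the distance of y as well
      have hL : (List.foldl
          (fun (st : Option Int × Option (List Int)) row =>
            let dist := get_euclidean_distance Xi row
            match st.1 with
            | none => (some dist, some row)
            | some db => if dist < db then (some dist, some row) else st)
          (some (get_euclidean_distance Xi x), some x) (y :: xs)).2 = bVal Xi x xs := by
        simp only [List.foldl_cons]
        rw [if_neg h]
        exact ih x
      rw [hL]
      unfold bVal
      have hxy : min (get_euclidean_distance Xi x) (get_euclidean_distance Xi y)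
          = get_euclidean_distance Xi x := by omega
      simp only [List.map_cons, List.foldl_cons, hxy]
      have hm_le := (PySem.List.foldl_min_le
        (xs.map (fun r => get_euclidean_distance Xi r)) (get_euclidean_distance Xi x)).1
      by_cases hx : get_euclidean_distance Xi x
          = List.foldl min (get_euclidean_distance Xi x)
              (xs.map (fun r => get_euclidean_distance Xi r))
      · rw [← hx, PySem.List.index?_cons_self, PySem.List.index?_cons_self]
        simp
      · rw [PySem.List.index?_cons_of_ne _ hx, PySem.List.index?_cons_of_ne _ (by omega),
            PySem.List.index?_cons_of_ne _ (by omega)]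
        cases hidx : PySem.List.index? (xs.map (fun r => get_euclidean_distance Xi r))
            (List.foldl min (get_euclidean_distance Xi x)
              (xs.map (fun r => get_euclidean_distance Xi r))) with
        | none =>
          -- impossible: since the minimum differs from the seed it is a member of the mapped list
          rcases PySem.List.foldl_min_mem
              (xs.map (fun r => get_euclidean_distance Xi r)) (get_euclidean_distance Xi x)
              with h1 | h1
          · exact absurd h1.symm hx
          · have := (PySem.List.index?_isSome_iff _ _).2 h1
            rw [hidx] at this; simp at this
        | some j =>
          simp only [Option.map_some]
          rw [PySem.List.pyGet?_natCast, PySem.List.pyGet?_natCast]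
          simp

-- ===== VERDICT (by name: the statement is the Claim_ definition above) =====
theorem exhausted_search_spec : Claim_equal_exhausted_search := by
  intro X Xi _
  unfold Spec_exhausted_search
  cases X with
  | nil => simp [exhausted_search, exhausted_search_alt]
  | cons x xs =>
    rw [alt_cons_eq_bVal]
    unfold exhausted_search
    simp only [List.foldl_cons]
    exact loopA_eq_bVal Xi xs x
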